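-- pv_equiv track=rewrite | github.com/itzraiss/lo | utils/logger.py | _analyze_ticket_overlap
-- ===== SOURCE A (Python) =====
-- from typing import Dict, Any, Optional
--
-- def _analyze_ticket_overlap(tickets: list) -> Dict[str, int]:
--     """Analisa overlap entre tickets"""
--     if len(tickets) < 2:
--         return {}
--
--     overlaps = {}
--     for i in range(len(tickets)):
--         for j in range(i + 1, len(tickets)):
--             key = f"ticket_{i+1}_vs_{j+1}"
--             overlap = len(set(tickets[i]) & set(tickets[j]))
--             overlaps[key] = overlap
--
--     return overlaps
-- ===== SOURCE B (Python) =====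
-- def _analyze_ticket_overlap(tickets: list):
--     """Pairwise distinct-element overlap counts via a single inverted index
--     (element -> list of ticket indices) instead of re-intersecting every pair."""
--     n = len(tickets)
--     if n < 2:
--         return {}
--     overlaps = {}
--     for i in range(n):
--         for j in range(i + 1, n):
--             overlaps[f"ticket_{i+1}_vs_{j+1}"] = 0
--     index = {}
--     for idx, ticket in enumerate(tickets):
--         for x in dict.fromkeys(ticket):
--             index.setdefault(x, []).append(idx)
--     for ids in index.values():
--         for a in range(len(ids)):
--             for b in range(a + 1, len(ids)):
--                 overlaps[f"ticket_{ids[a] + 1}_vs_{ids[b] + 1}"] += 1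
--     return overlaps
-- ===== Notes on version B (the rewrite author's own statement) =====
-- stated objective: faster
-- what changed: Replaces the per-pair set intersections (rebuilding each ticket's set n times) with one inverted index element->ticket-indices built in a single pass; overlap counts are accumulated per shared element over index lists after zero-initializing every pair key.
import Mathlib
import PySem

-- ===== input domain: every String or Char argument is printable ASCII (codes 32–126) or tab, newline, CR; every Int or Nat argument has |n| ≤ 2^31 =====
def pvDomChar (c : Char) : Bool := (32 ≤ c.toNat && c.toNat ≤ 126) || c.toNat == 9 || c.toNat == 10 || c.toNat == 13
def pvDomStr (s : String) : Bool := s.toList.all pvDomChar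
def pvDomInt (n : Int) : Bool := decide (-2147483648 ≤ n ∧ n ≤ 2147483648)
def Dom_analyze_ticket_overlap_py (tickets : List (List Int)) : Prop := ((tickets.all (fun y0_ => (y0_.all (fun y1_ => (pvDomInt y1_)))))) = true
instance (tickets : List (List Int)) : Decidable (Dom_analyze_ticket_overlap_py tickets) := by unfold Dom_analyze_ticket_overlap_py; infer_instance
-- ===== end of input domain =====

-- B replaces A's per-pair set intersections with one inverted index (element -> ticket indices)
-- and accumulates the pair counts from it after zero-initializing every pair key.

-- the f-string key f"ticket_{i+1}_vs_{j+1}" shared verbatim by both Pythons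
def pvKey (i j : Int) : String :=
  "ticket_" ++ PySem.Int.toStr (i + 1) ++ "_vs_" ++ PySem.Int.toStr (j + 1)

-- ===== PORT A =====
-- tickets[i] / tickets[j]: indices produced by range(len) are always in range, so getD [] is exact
def analyze_ticket_overlap_py (tickets : List (List Int)) : List (String × Int) :=
  if PySem.List.len tickets < 2 then [] else
  ((PySem.List.pyRange 0 (PySem.List.len tickets)).foldl (fun overlaps i =>
      (PySem.List.pyRange (i + 1) (PySem.List.len tickets)).foldl (fun overlaps j =>
        overlaps.insert (pvKey i j)
          (PySem.Set.len (PySem.Set.inter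
            (PySem.Set.ofList ((PySem.List.pyGet? tickets i).getD []))
            (PySem.Set.ofList ((PySem.List.pyGet? tickets j).getD []))))) overlaps)
    (PySem.Dict.empty)).items

-- ===== PORT B =====
-- index.setdefault(x, []).append(idx) is d.modify x [] (· ++ [idx]);
-- overlaps[key] += 1 is d.modify key 0 (· + 1) — the key is always present, so this is exact;
-- ids[a] / ids[b]: indices from range(len(ids)) are in range, so getD 0 is exact
def analyze_ticket_overlap_py_alt (tickets : List (List Int)) : List (String × Int) :=
  let n := PySem.List.len tickets
  if n < 2 then [] else
  let overlaps0 : PySem.Dict String Int :=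
    (PySem.List.pyRange 0 n).foldl (fun d i =>
      (PySem.List.pyRange (i + 1) n).foldl (fun d j => d.insert (pvKey i j) 0) d)
      PySem.Dict.empty
  let index : PySem.Dict Int (List Int) :=
    (PySem.List.enumerate tickets).foldl (fun d p =>
      (PySem.List.dedup p.2).foldl (fun d x => d.modify x [] (· ++ [p.1])) d)
      PySem.Dict.empty
  let final : PySem.Dict String Int :=
    index.values.foldl (fun d ids =>
      (PySem.List.pyRange 0 (PySem.List.len ids)).foldl (fun d a =>
        (PySem.List.pyRange (a + 1) (PySem.List.len ids)).foldl (fun d b =>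
          d.modify (pvKey ((PySem.List.pyGet? ids a).getD 0) ((PySem.List.pyGet? ids b).getD 0))
            0 (· + 1)) d) d) overlaps0
  final.items

-- ===== PRECONDITION & SPEC =====
def Spec_analyze_ticket_overlap_py (tickets : List (List Int)) (out : List (String × Int)) : Prop := out = analyze_ticket_overlap_py_alt tickets
instance (tickets : List (List Int)) (out : List (String × Int)) : Decidable (Spec_analyze_ticket_overlap_py tickets out) := by unfold Spec_analyze_ticket_overlap_py; infer_instance

-- ===== CLAIM (what is proved, stated in full; the proofs are below) =====
def Claim_equal_analyze_ticket_overlap_py : Prop := ∀ (tickets : List (List Int)), Dom_analyze_ticket_overlap_py tickets → Spec_analyze_ticket_overlap_py tickets (analyze_ticket_overlap_py tickets)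

-- ===== LEMMAS AND PROOFS =====

-- ## generic list plumbing

theorem pv_foldl_nested {α β γ : Type} (l : List α) (g : α → List β) (f : γ → β → γ) (init : γ) :
    l.foldl (fun acc x => (g x).foldl f acc) init = (l.flatMap g).foldl f init := by
  induction l generalizing init with
  | nil => rfl
  | cons a t ih => simp [List.flatMap_cons, List.foldl_append, ih]

theorem pv_flatMap_ite {α β : Type} (l : List α) (p : α → Bool) (f : α → β) :
    l.flatMap (fun x => if p x then [f x] else []) = (l.filter p).map f := by
  induction l with
  | nil => rfl
  | cons a t ih => by_cases h : p a <;> simp [List.filter_cons, h, ih]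

theorem pv_count_flatMap {α β : Type} [DecidableEq β] (l : List α) (g : α → List β) (b : β) :
    (l.flatMap g).count b = (l.map (fun x => (g x).count b)).sum := by
  induction l with
  | nil => rfl
  | cons a t ih => simp [List.flatMap_cons, List.count_append, ih]

theorem pv_sum_ite_eq_countP {α : Type} (l : List α) (p : α → Prop) [DecidablePred p] :
    (l.map (fun x => if p x then (1 : Nat) else 0)).sum = l.countP (fun x => decide (p x)) := by
  induction l with
  | nil => rfl
  | cons a t ih =>
    by_cases h : p a
    · simp [List.countP_cons, h, ih, Nat.add_comm]
    · simp [List.countP_cons, h, ih]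

theorem pv_length_eq_of_nodup_mem_iff {α : Type} [DecidableEq α] {l₁ l₂ : List α}
    (h₁ : l₁.Nodup) (h₂ : l₂.Nodup) (h : ∀ x, x ∈ l₁ ↔ x ∈ l₂) : l₁.length = l₂.length := by
  rw [← List.toFinset_card_of_nodup h₁, ← List.toFinset_card_of_nodup h₂]
  congr 1
  ext x
  simp [h x]

-- ## pyRange with step 1

theorem pv_pyRange_eq (a b : Int) :
    PySem.List.pyRange a b = (List.range (b - a).toNat).map (fun k : Nat => a + (k : Int)) := by
  unfold PySem.List.pyRange
  rw [if_neg (one_ne_zero), if_pos (one_pos)]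
  split_ifs with h
  · simp
  · have h0 : (b - a).toNat = 0 := by omega
    simp [h0]

theorem pv_mem_pyRange {a b i : Int} :
    i ∈ PySem.List.pyRange a b ↔ a ≤ i ∧ i < b := by
  rw [pv_pyRange_eq]
  simp only [List.mem_map, List.mem_range]
  constructor
  · rintro ⟨k, hk, rfl⟩; omega
  · intro h
    refine ⟨(i - a).toNat, by omega, by omega⟩

theorem pv_nodup_pyRange (a b : Int) : (PySem.List.pyRange a b).Nodup := by
  rw [pv_pyRange_eq]
  exact List.Nodup.map (fun x y h => by omega) List.nodup_range

-- ## the pair list both ports traverse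

def pvPairs (n : Int) : List (Int × Int) :=
  (PySem.List.pyRange 0 n).flatMap (fun i => (PySem.List.pyRange (i + 1) n).map (fun j => (i, j)))

theorem pv_mem_pvPairs {n : Int} {p : Int × Int} :
    p ∈ pvPairs n ↔ 0 ≤ p.1 ∧ p.1 < p.2 ∧ p.2 < n := by
  cases p with | mk i j =>
  simp only [pvPairs, List.mem_flatMap, List.mem_map, Prod.mk.injEq]
  constructor
  · rintro ⟨i', hi', j', hj', rfl, rfl⟩
    rw [pv_mem_pyRange] at hi' hj'; omega
  · rintro ⟨h1, h2, h3⟩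
    exact ⟨i, pv_mem_pyRange.2 ⟨h1, by omega⟩, j, pv_mem_pyRange.2 ⟨by omega, h3⟩, rfl, rfl⟩

theorem pv_nodup_pvPairs (n : Int) : (pvPairs n).Nodup := by
  rw [pvPairs, List.nodup_flatMap]
  constructor
  · intro i _
    exact List.Nodup.map (fun x y h => (Prod.mk.injEq _ _ _ _).mp h |>.2) (pv_nodup_pyRange _ _)
  · refine List.Pairwise.imp ?_ (pv_nodup_pyRange 0 n)
    intro x y hxy p hp hq
    simp only [List.mem_map] at hp hq
    obtain ⟨a, _, rfl⟩ := hp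
    obtain ⟨b, _, h⟩ := hq
    exact hxy (((Prod.mk.injEq _ _ _ _).mp h).1.symm)

-- ## decimal strings: str(n) for n ≥ 1 is a nonempty all-digit string, injectively

def pvRep (n : Nat) : List Char :=
  if n = 0 then ['0'] else ((Nat.digits 10 n).map Nat.digitChar).reverse

theorem pv_pvRep_step {n : Nat} (h : 10 ≤ n) :
    pvRep n = pvRep (n / 10) ++ [Nat.digitChar (n % 10)] := by
  have h1 : n ≠ 0 := by omega
  have h2 : n / 10 ≠ 0 := by omega
  rw [pvRep, pvRep, if_neg h1, if_neg h2,
    Nat.digits_def' (by norm_num : (1:Nat) < 10) (by omega)]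
  simp

theorem pv_toDigitsCore_eq (fuel : Nat) : ∀ (n : Nat) (acc : List Char), n < fuel →
    Nat.toDigitsCore 10 fuel n acc = pvRep n ++ acc := by
  induction fuel with
  | zero => intro n acc h; omega
  | succ f ih =>
    intro n acc h
    rw [show Nat.toDigitsCore 10 (f + 1) n acc
        = (if n / 10 = 0 then Nat.digitChar (n % 10) :: acc
           else Nat.toDigitsCore 10 f (n / 10) (Nat.digitChar (n % 10) :: acc)) from rfl]
    split_ifs with h0
    · have hn : n < 10 := by omega
      by_cases hz : n = 0
      · subst hz; simp [pvRep]; decide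
      · rw [pvRep, if_neg hz, Nat.digits_def' (by norm_num : (1:Nat) < 10) (by omega)]
        have : n / 10 = 0 := h0
        simp [this, Nat.mod_eq_of_lt hn]
    · have h10 : 10 ≤ n := by
        by_contra hc
        exact h0 (by omega)
      rw [ih (n / 10) _ (by omega), pv_pvRep_step h10, List.append_assoc]
      rfl

theorem pv_toChars_eq {i : Int} (h : 0 ≤ i) :
    PySem.Int.toChars i = pvRep i.toNat := by
  rw [PySem.Int.toChars, if_neg (by omega)]
  rw [show Nat.toDigits 10 i.toNat = Nat.toDigitsCore 10 (i.toNat + 1) i.toNat [] from rfl]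
  rw [pv_toDigitsCore_eq _ _ _ (by omega), List.append_nil]

theorem pv_digitChar_isDigit {d : Nat} (h : d < 10) : (Nat.digitChar d).isDigit := by
  interval_cases d <;> decide

theorem pv_pvRep_digits (n : Nat) : ∀ c ∈ pvRep n, c.isDigit := by
  intro c hc
  rw [pvRep] at hc
  split_ifs at hc with h
  · simp at hc; subst hc; decide
  · rw [List.mem_reverse, List.mem_map] at hc
    obtain ⟨d, hd, rfl⟩ := hc
    exact pv_digitChar_isDigit (Nat.digits_lt_base (by norm_num) hd)

theorem pv_digitChar_toNat {d : Nat} (h : d < 10) : (Nat.digitChar d).toNat - 48 = d := by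
  interval_cases d <;> decide

theorem pv_val_pvRep (n : Nat) : ∀ (a : Nat),
    (pvRep n).foldl (fun a c => 10 * a + (c.toNat - 48)) a = a * 10 ^ (pvRep n).length + n := by
  induction n using Nat.strong_induction_on with
  | _ n ih =>
    intro a
    by_cases h10 : 10 ≤ n
    · rw [pv_pvRep_step h10, List.foldl_append, List.length_append]
      rw [ih (n / 10) (by omega) a]
      simp only [List.foldl_cons, List.foldl_nil, List.length_cons, List.length_nil]
      rw [pv_digitChar_toNat (Nat.mod_lt _ (by norm_num))]
      ring_nf
      omega
    · have hrep : pvRep n = [Nat.digitChar n] := by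
        by_cases hz : n = 0
        · subst hz; rfl
        · rw [pvRep, if_neg hz, Nat.digits_def' (by norm_num : (1:Nat) < 10) (by omega)]
          have : n / 10 = 0 := by omega
          rw [Nat.mod_eq_of_lt (by omega), this]
          simp
      rw [hrep]
      simp only [List.foldl_cons, List.foldl_nil, List.length_cons, List.length_nil]
      rw [pv_digitChar_toNat (by omega)]
      ring_nf

theorem pv_pvRep_inj {m n : Nat} (h : pvRep m = pvRep n) : m = n := by
  have h1 := pv_val_pvRep m 0
  have h2 := pv_val_pvRep n 0
  rw [h] at h1
  rw [h1] at h2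
  omega

-- ## key injectivity

theorem pv_split_underscore (a : List Char) (r : List Char) :
    ∀ (c : List Char) (s : List Char), (∀ x ∈ a, x ≠ '_') → (∀ x ∈ c, x ≠ '_') →
    a ++ '_' :: r = c ++ '_' :: s → a = c ∧ r = s := by
  induction a with
  | nil =>
    intro c s _ hc h
    cases c with
    | nil => simpa using h
    | cons y ys =>
      simp only [List.nil_append, List.cons_append, List.cons.injEq] at h
      exact absurd h.1.symm (hc y (by simp))
  | cons x xs ih =>
    intro c s ha hc h
    cases c with
    | nil =>
      simp only [List.cons_append, List.nil_append, List.cons.injEq] at h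
      exact absurd h.1 (ha x (by simp))
    | cons y ys =>
      simp only [List.cons_append, List.cons.injEq] at h
      obtain ⟨rfl, h2⟩ := h
      obtain ⟨h3, h4⟩ := ih ys s (fun z hz => ha z (List.mem_cons_of_mem _ hz)) (fun z hz => hc z (List.mem_cons_of_mem _ hz)) h2
      exact ⟨by rw [h3], h4⟩

theorem pv_rep_no_underscore (n : Nat) : ∀ x ∈ pvRep n, x ≠ '_' := by
  intro x hx
  have := pv_pvRep_digits n x hx
  intro heq
  subst heq
  exact absurd this (by decide)

theorem pv_pvKey_inj {i j i' j' : Int} (hi : 0 ≤ i) (hj : 0 ≤ j) (hi' : 0 ≤ i') (hj' : 0 ≤ j')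
    (h : pvKey i j = pvKey i' j') : i = i' ∧ j = j' := by
  have h' := congrArg String.toList h
  simp only [pvKey, String.toList_append, PySem.Int.toList_toStr] at h'
  rw [pv_toChars_eq (by omega : (0:Int) ≤ i + 1), pv_toChars_eq (by omega : (0:Int) ≤ j + 1),
      pv_toChars_eq (by omega : (0:Int) ≤ i' + 1), pv_toChars_eq (by omega : (0:Int) ≤ j' + 1)] at h'
  rw [show ("ticket_" : String).toList = ['t','i','c','k','e','t','_'] from rfl,
      show ("_vs_" : String).toList = ['_','v','s','_'] from rfl] at h'
  simp only [List.append_assoc, List.cons_append, List.nil_append, List.cons.injEq, true_and] at h'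
  have h1 := pv_split_underscore (pvRep (i + 1).toNat) ('v' :: 's' :: '_' :: pvRep (j + 1).toNat)
    (pvRep (i' + 1).toNat) ('v' :: 's' :: '_' :: pvRep (j' + 1).toNat)
    (pv_rep_no_underscore _) (pv_rep_no_underscore _) (by simpa using h')
  obtain ⟨ha, hb⟩ := h1
  simp only [List.cons.injEq, true_and] at hb
  have e1 := pv_pvRep_inj ha
  have e2 := pv_pvRep_inj hb
  omega

-- ## shorthand for the two ports' data

def pvTk (tickets : List (List Int)) (i : Int) : List Int :=
  (PySem.List.pyGet? tickets i).getD []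

def pvOv (tickets : List (List Int)) (i j : Int) : Int :=
  PySem.Set.len (PySem.Set.inter (PySem.Set.ofList (pvTk tickets i)) (PySem.Set.ofList (pvTk tickets j)))

def pvKeyP (p : Int × Int) : String := pvKey p.1 p.2

theorem pv_nodup_keymap {n : Int} : ((pvPairs n).map pvKeyP).Nodup := by
  refine List.Nodup.map_on ?_ (pv_nodup_pvPairs n)
  intro p hp q hq hpq
  rw [pv_mem_pvPairs] at hp hq
  have := pv_pvKey_inj (by omega) (by omega) (by omega) (by omega) hpq
  exact Prod.ext this.1 this.2

-- both ports' nested insert loop, for an arbitrary value function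
theorem pv_fold_insert_items (n : Int) (v : Int → Int → Int) :
    ((PySem.List.pyRange 0 n).foldl (fun d i =>
        (PySem.List.pyRange (i + 1) n).foldl (fun d j => d.insert (pvKey i j) (v i j)) d)
      PySem.Dict.empty).items
    = (pvPairs n).map (fun p => (pvKeyP p, v p.1 p.2)) := by
  have hinner : ∀ (d : PySem.Dict String Int) (i : Int),
      (PySem.List.pyRange (i + 1) n).foldl (fun d j => d.insert (pvKey i j) (v i j)) d
      = ((PySem.List.pyRange (i + 1) n).map (fun j => (i, j))).foldl
          (fun d p => d.insert (pvKeyP p) (v p.1 p.2)) d := by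
    intro d i
    rw [List.foldl_map]
    rfl
  calc ((PySem.List.pyRange 0 n).foldl (fun d i =>
          (PySem.List.pyRange (i + 1) n).foldl (fun d j => d.insert (pvKey i j) (v i j)) d)
        PySem.Dict.empty).items
      = ((PySem.List.pyRange 0 n).foldl (fun d i =>
          ((PySem.List.pyRange (i + 1) n).map (fun j => (i, j))).foldl
            (fun d p => d.insert (pvKeyP p) (v p.1 p.2)) d) PySem.Dict.empty).items := by
        have hfun : (fun (d : PySem.Dict String Int) (i : Int) =>
            (PySem.List.pyRange (i + 1) n).foldl (fun d j => d.insert (pvKey i j) (v i j)) d)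
            = (fun (d : PySem.Dict String Int) (i : Int) =>
            ((PySem.List.pyRange (i + 1) n).map (fun j => (i, j))).foldl
              (fun d p => d.insert (pvKeyP p) (v p.1 p.2)) d) :=
          funext fun d => funext fun i => hinner d i
        rw [hfun]
    _ = ((pvPairs n).foldl (fun d p => d.insert (pvKeyP p) (v p.1 p.2)) PySem.Dict.empty).items := by
        rw [pv_foldl_nested]
        rfl
    _ = (pvPairs n).map (fun p => (pvKeyP p, v p.1 p.2)) := by
        rw [PySem.Dict.items_foldl_insert_fresh (pvPairs n) pvKeyP (fun p => v p.1 p.2)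
          PySem.Dict.empty (fun a _ => PySem.Dict.contains_empty _) pv_nodup_keymap]
        rfl

-- ## enumerate

theorem pv_pyGet?_cons {α : Type} (x : α) (t : List α) {k : Int} (hk : 0 ≤ k) :
    PySem.List.pyGet? (x :: t) (k + 1) = PySem.List.pyGet? t k := by
  rw [PySem.List.pyGet?_of_nonneg _ (by omega), PySem.List.pyGet?_of_nonneg _ hk]
  have : (k + 1).toNat = k.toNat + 1 := by omega
  rw [this]
  rfl

theorem pv_mem_enumerate {α : Type} (xs : List α) : ∀ (s : Int) (p : Int × α),
    p ∈ PySem.List.enumerate xs s ↔ s ≤ p.1 ∧ p.1 < s + xs.length ∧ PySem.List.pyGet? xs (p.1 - s) = some p.2 := by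
  induction xs with
  | nil =>
    intro s p
    simp only [PySem.List.enumerate, List.not_mem_nil, false_iff, List.length_nil]
    omega
  | cons x t ih =>
    intro s p
    rw [show PySem.List.enumerate (x :: t) s = (s, x) :: PySem.List.enumerate t (s + 1) from rfl]
    rw [List.mem_cons, ih (s + 1) p]
    constructor
    · rintro (rfl | ⟨h1, h2, h3⟩)
      · refine ⟨le_refl _, by simp only [List.length_cons]; push_cast; omega, ?_⟩
        rw [show (s, x).1 - s = 0 from by omega]
        exact PySem.List.pyGet?_zero_cons x t
      · refine ⟨by omega, by simp only [List.length_cons]; push_cast; omega, ?_⟩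
        rw [show p.1 - s = (p.1 - (s + 1)) + 1 from by omega, pv_pyGet?_cons x t (by omega)]
        exact h3
    · rintro ⟨h1, h2, h3⟩
      by_cases hs : p.1 = s
      · left
        rw [hs, show s - s = 0 from by omega, PySem.List.pyGet?_zero_cons x t] at h3
        obtain ⟨p1, p2⟩ := p
        simp only at hs h3
        simp [hs, (Option.some.injEq _ _).mp h3]
      · right
        refine ⟨by omega, by simp only [List.length_cons] at h2 ⊢; push_cast at h2 ⊢; omega, ?_⟩
        rw [show p.1 - s = (p.1 - (s + 1)) + 1 from by omega, pv_pyGet?_cons x t (by omega)] at h3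
        exact h3

theorem pv_pairwise_enumerate {α : Type} (xs : List α) : ∀ (s : Int),
    (PySem.List.enumerate xs s).Pairwise (fun p q => p.1 < q.1) := by
  induction xs with
  | nil => intro s; exact List.Pairwise.nil
  | cons x t ih =>
    intro s
    rw [show PySem.List.enumerate (x :: t) s = (s, x) :: PySem.List.enumerate t (s + 1) from rfl]
    refine List.Pairwise.cons ?_ (ih (s + 1))
    intro q hq
    have := (pv_mem_enumerate t (s + 1) q).mp hq
    simp only
    omega

-- ## generic nested pair fold

theorem pv_fold_pairs {γ : Type} (m : Int) (F : γ → Int → Int → γ) (init : γ) :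
    (PySem.List.pyRange 0 m).foldl (fun d i =>
      (PySem.List.pyRange (i + 1) m).foldl (fun d j => F d i j) d) init
    = (pvPairs m).foldl (fun d q => F d q.1 q.2) init := by
  have hfun : (fun (d : γ) (i : Int) =>
      (PySem.List.pyRange (i + 1) m).foldl (fun d j => F d i j) d)
      = (fun (d : γ) (i : Int) =>
      ((PySem.List.pyRange (i + 1) m).map (fun j => (i, j))).foldl (fun d q => F d q.1 q.2) d) := by
    funext d i
    rw [List.foldl_map]
  rw [hfun, pv_foldl_nested]
  rfl

-- ## the inverted index of port B

def pvE (tickets : List (List Int)) : List (Int × Int) :=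
  (PySem.List.enumerate tickets).flatMap (fun q => (PySem.List.dedup q.2).map (fun y => (y, q.1)))

def pvOcc (tickets : List (List Int)) (x : Int) : List Int :=
  ((PySem.List.enumerate tickets).filter (fun q => decide (x ∈ q.2))).map (fun q => q.1)

def pvIndex (tickets : List (List Int)) : PySem.Dict Int (List Int) :=
  (PySem.List.enumerate tickets).foldl (fun d p =>
    (PySem.List.dedup p.2).foldl (fun d x => d.modify x [] (· ++ [p.1])) d)
    PySem.Dict.empty

theorem pv_index_eq (tickets : List (List Int)) :
    pvIndex tickets = (pvE tickets).foldl (fun d p => d.modify p.1 [] (· ++ [p.2])) PySem.Dict.empty := by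
  rw [pvIndex, pvE]
  have hfun : (fun (d : PySem.Dict Int (List Int)) (q : Int × List Int) =>
      (PySem.List.dedup q.2).foldl (fun d x => d.modify x [] (· ++ [q.1])) d)
      = (fun (d : PySem.Dict Int (List Int)) (q : Int × List Int) =>
      ((PySem.List.dedup q.2).map (fun y => (y, q.1))).foldl
        (fun d p => d.modify p.1 [] (· ++ [p.2])) d) := by
    funext d q
    rw [List.foldl_map]
  rw [hfun, pv_foldl_nested]

theorem pv_filter_beq_nodup {l : List Int} (h : l.Nodup) (x : Int) :
    l.filter (· == x) = if x ∈ l then [x] else [] := by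
  induction l with
  | nil => simp
  | cons a t ih =>
    rw [List.nodup_cons] at h
    by_cases hax : a = x
    · subst hax
      have : t.filter (· == a) = [] := by
        rw [List.filter_eq_nil_iff]
        intro b hb
        simp only [beq_iff_eq]
        intro hba
        exact h.1 (hba ▸ hb)
      simp [List.filter_cons, this]
    · have hne : ((a == x) = false) := by simp [hax]
      rw [List.filter_cons, hne]
      simp only [Bool.false_eq_true, if_false]
      rw [ih h.2]
      have hmem : (x ∈ a :: t) ↔ (x ∈ t) := by
        rw [List.mem_cons]
        exact ⟨fun h' => h'.elim (fun h'' => absurd h''.symm hax) id, Or.inr⟩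
      by_cases hx : x ∈ t
      · rw [if_pos hx, if_pos (hmem.mpr hx)]
      · rw [if_neg hx, if_neg (fun h' => hx (hmem.mp h'))]

theorem pv_getD_index (tickets : List (List Int)) (x : Int) :
    (pvIndex tickets).getD x [] = pvOcc tickets x := by
  rw [pv_index_eq, PySem.Dict.getD_foldl_modify_append, PySem.Dict.getD_empty, List.nil_append]
  rw [pvE, List.filter_flatMap, List.map_flatMap]
  have hq : ∀ q : Int × List Int,
      (((PySem.List.dedup q.2).map (fun y => (y, q.1))).filter (fun p => p.1 == x)).map (fun p => p.2)
      = if decide (x ∈ q.2) then [q.1] else [] := by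
    intro q
    rw [List.filter_map, List.map_map]
    have : ((fun (p : Int × Int) => p.1 == x) ∘ (fun y => (y, q.1))) = (· == x) := rfl
    rw [this, pv_filter_beq_nodup (PySem.List.nodup_dedup q.2) x]
    by_cases hx : x ∈ q.2
    · rw [if_pos ((PySem.List.mem_dedup q.2 x).mpr hx), if_pos (by simp [hx])]
      rfl
    · rw [if_neg (fun hc => hx ((PySem.List.mem_dedup q.2 x).mp hc)), if_neg (by simp [hx])]
      rfl
  have : ((PySem.List.enumerate tickets).flatMap
        (fun q => (((PySem.List.dedup q.2).map (fun y => (y, q.1))).filter (fun p => p.1 == x)).map (fun p => p.2)))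
      = (PySem.List.enumerate tickets).flatMap (fun q => if decide (x ∈ q.2) then [q.1] else []) := by
    exact List.flatMap_congr (fun q _ => hq q)
  rw [this, pv_flatMap_ite]
  rfl

-- ## occurrence lists

theorem pv_pyGet_getD {α : Type} (l : List α) (d : α) {a : Int} (h0 : 0 ≤ a) (hl : a < (l.length : Int)) :
    (PySem.List.pyGet? l a).getD d = l[a.toNat]'(by omega) := by
  rw [PySem.List.pyGet?_of_nonneg _ h0, List.getElem?_eq_getElem (by omega)]
  rfl

theorem pv_occ_mem (tickets : List (List Int)) (x i : Int) :
    i ∈ pvOcc tickets x ↔ 0 ≤ i ∧ i < (tickets.length : Int) ∧ x ∈ pvTk tickets i := by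
  simp only [pvOcc, List.mem_map, List.mem_filter]
  constructor
  · rintro ⟨q, ⟨hq, hx⟩, rfl⟩
    obtain ⟨h1, h2, h3⟩ := (pv_mem_enumerate tickets 0 q).mp hq
    rw [sub_zero] at h3
    refine ⟨h1, by omega, ?_⟩
    rw [pvTk, h3]
    simpa using hx
  · rintro ⟨h1, h2, h3⟩
    refine ⟨(i, pvTk tickets i), ⟨?_, by simpa using h3⟩, rfl⟩
    rw [pv_mem_enumerate]
    refine ⟨h1, by omega, ?_⟩
    rw [sub_zero]
    simp only [pvTk]
    rw [PySem.List.pyGet?_of_nonneg _ h1, List.getElem?_eq_getElem (by omega)]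
    rfl

theorem pv_occ_pairwise (tickets : List (List Int)) (x : Int) :
    (pvOcc tickets x).Pairwise (· < ·) := by
  rw [pvOcc]
  exact List.Pairwise.map _ (fun a b h => h)
    (List.Pairwise.filter _ (pv_pairwise_enumerate tickets 0))

-- ## the index dict's keys and values

theorem pv_index_keys (tickets : List (List Int)) :
    (pvIndex tickets).keys = PySem.Set.ofList ((pvE tickets).map (fun p => p.1)) := by
  rw [pv_index_eq, PySem.Dict.keys_foldl_modify_key (pvE tickets) Prod.fst [] (fun _ p => (· ++ [p.2])) PySem.Dict.empty]
  rfl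

theorem pv_nodup_index_keys (tickets : List (List Int)) : (pvIndex tickets).keys.Nodup := by
  rw [pv_index_keys]
  exact PySem.Set.nodup_ofList _

theorem pv_mem_index_keys (tickets : List (List Int)) (z : Int) :
    z ∈ (pvIndex tickets).keys ↔ ∃ i : Int, 0 ≤ i ∧ i < (tickets.length : Int) ∧ z ∈ pvTk tickets i := by
  rw [pv_index_keys, PySem.Set.mem_ofList]
  simp only [pvE, List.mem_map, List.mem_flatMap]
  constructor
  · rintro ⟨p, ⟨q, hq, hp⟩, rfl⟩
    obtain ⟨h1, h2, h3⟩ := (pv_mem_enumerate tickets 0 q).mp hq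
    rw [sub_zero] at h3
    obtain ⟨y, hy, hpe⟩ := hp
    subst hpe
    refine ⟨q.1, h1, by omega, ?_⟩
    rw [pvTk, h3]
    exact (PySem.List.mem_dedup _ _).mp hy
  · rintro ⟨i, h1, h2, h3⟩
    refine ⟨(z, i), ⟨(i, pvTk tickets i), ?_, ?_⟩, rfl⟩
    · rw [pv_mem_enumerate]
      refine ⟨h1, by omega, ?_⟩
      rw [sub_zero]
      simp only [pvTk]
      rw [PySem.List.pyGet?_of_nonneg _ h1, List.getElem?_eq_getElem (by omega)]
      rfl
    · exact ⟨z, (PySem.List.mem_dedup _ _).mpr h3, rfl⟩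

theorem pv_index_values (tickets : List (List Int)) :
    (pvIndex tickets).values = (pvIndex tickets).keys.map (pvOcc tickets) := by
  rw [PySem.Dict.values_eq_map_keys (pvIndex tickets) (pv_nodup_index_keys tickets) []]
  exact List.map_congr_left (fun k _ => pv_getD_index tickets k)

-- ## the bump-key list of port B's final loop

def pvBump (ids : List Int) : List String :=
  (pvPairs (PySem.List.len ids)).map (fun q =>
    pvKey ((PySem.List.pyGet? ids q.1).getD 0) ((PySem.List.pyGet? ids q.2).getD 0))

def pvK (tickets : List (List Int)) : List String :=
  (pvIndex tickets).values.flatMap pvBump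

theorem pv_set_update_self {α : Type} [BEq α] [LawfulBEq α] (s : PySem.Set α) :
    ∀ (K : List α), (∀ k ∈ K, k ∈ s) → PySem.Set.update s K = s := by
  intro K
  induction K with
  | nil => intro _; rfl
  | cons k t ih =>
    intro h
    have hk : PySem.Set.add s k = s := by
      rw [PySem.Set.add, if_pos]
      simp only [PySem.Set.contains, List.contains_iff_exists_mem_beq]
      exact ⟨k, h k (List.mem_cons_self ..), by simp⟩
    rw [show PySem.Set.update s (k :: t) = PySem.Set.update (PySem.Set.add s k) t from rfl, hk]
    exact ih (fun z hz => h z (List.mem_cons_of_mem _ hz))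

theorem pv_K_sub (tickets : List (List Int)) :
    ∀ k ∈ pvK tickets, k ∈ (pvPairs (tickets.length : Int)).map pvKeyP := by
  intro k hk
  rw [pvK, List.mem_flatMap] at hk
  obtain ⟨ids, hids, hk⟩ := hk
  rw [pv_index_values, List.mem_map] at hids
  obtain ⟨x, _, rfl⟩ := hids
  rw [pvBump, List.mem_map] at hk
  obtain ⟨q, hq, rfl⟩ := hk
  rw [pv_mem_pvPairs] at hq
  simp only [PySem.List.len] at hq
  have ha := pv_pyGet_getD (pvOcc tickets x) 0 (a := q.1) (by omega) (by omega)
  have hb := pv_pyGet_getD (pvOcc tickets x) 0 (a := q.2) (by omega) (by omega)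
  rw [ha, hb]
  set A := (pvOcc tickets x)[q.1.toNat]'(by omega) with hA
  set B := (pvOcc tickets x)[q.2.toNat]'(by omega) with hB
  have hAmem : A ∈ pvOcc tickets x := by rw [hA]; exact List.getElem_mem _
  have hBmem : B ∈ pvOcc tickets x := by rw [hB]; exact List.getElem_mem _
  have hAb := (pv_occ_mem tickets x A).mp hAmem
  have hBb := (pv_occ_mem tickets x B).mp hBmem
  have hAB : A < B := by
    have := (List.pairwise_iff_getElem.mp (pv_occ_pairwise tickets x)) q.1.toNat q.2.toNat
      (by omega) (by omega) (by omega)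
    exact this
  rw [List.mem_map]
  refine ⟨(A, B), ?_, rfl⟩
  rw [pv_mem_pvPairs]
  exact ⟨hAb.1, hAB, hBb.2.1⟩

-- ## counting the bumps of one pair key

theorem pv_nodup_bump (tickets : List (List Int)) (x : Int) : (pvBump (pvOcc tickets x)).Nodup := by
  set ids := pvOcc tickets x with hids
  rw [pvBump]
  refine List.Nodup.map_on ?_ (pv_nodup_pvPairs _)
  intro q hq q' hq' heq
  rw [pv_mem_pvPairs] at hq hq'
  simp only [PySem.List.len] at hq hq'
  rw [pv_pyGet_getD ids 0 (a := q.1) (by omega) (by omega),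
      pv_pyGet_getD ids 0 (a := q.2) (by omega) (by omega),
      pv_pyGet_getD ids 0 (a := q'.1) (by omega) (by omega),
      pv_pyGet_getD ids 0 (a := q'.2) (by omega) (by omega)] at heq
  have hnn : ∀ y ∈ ids, 0 ≤ y := fun y hy => ((pv_occ_mem tickets x y).mp hy).1
  have hinj := pv_pvKey_inj
    (hnn _ (List.getElem_mem _)) (hnn _ (List.getElem_mem _))
    (hnn _ (List.getElem_mem _)) (hnn _ (List.getElem_mem _)) heq
  have hpw := List.pairwise_iff_getElem.mp (pv_occ_pairwise tickets x)
  have hne : ∀ (a b : Nat) (ha : a < ids.length) (hb : b < ids.length),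
      a ≠ b → ids[a] ≠ ids[b] := by
    intro a b ha hb hab
    rcases Nat.lt_or_ge a b with h | h
    · exact ne_of_lt (hpw a b ha hb h)
    · exact ne_of_gt (hpw b a hb ha (by omega))
  have e1 : q.1.toNat = q'.1.toNat := by
    by_contra hc
    exact hne _ _ (by omega) (by omega) hc hinj.1
  have e2 : q.2.toNat = q'.2.toNat := by
    by_contra hc
    exact hne _ _ (by omega) (by omega) hc hinj.2
  have : q.1 = q'.1 := by omega
  have : q.2 = q'.2 := by omega
  exact Prod.ext (by omega) (by omega)

theorem pv_mem_bump (tickets : List (List Int)) (x : Int) {i j : Int}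
    (h0 : 0 ≤ i) (hij : i < j) (hjn : j < (tickets.length : Int)) :
    pvKey i j ∈ pvBump (pvOcc tickets x) ↔ (x ∈ pvTk tickets i ∧ x ∈ pvTk tickets j) := by
  set ids := pvOcc tickets x with hids
  have hnn : ∀ y ∈ ids, 0 ≤ y := fun y hy => ((pv_occ_mem tickets x y).mp hy).1
  have hpw := List.pairwise_iff_getElem.mp (pv_occ_pairwise tickets x)
  rw [pvBump, List.mem_map]
  constructor
  · rintro ⟨q, hq, heq⟩
    rw [pv_mem_pvPairs] at hq
    simp only [PySem.List.len] at hq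
    rw [pv_pyGet_getD ids 0 (a := q.1) (by omega) (by omega),
        pv_pyGet_getD ids 0 (a := q.2) (by omega) (by omega)] at heq
    have hinj := pv_pvKey_inj (hnn _ (List.getElem_mem _)) (hnn _ (List.getElem_mem _))
      h0 (by omega) heq
    constructor
    · have : ids[q.1.toNat]'(by omega) ∈ ids := List.getElem_mem _
      rw [hinj.1] at this
      exact ((pv_occ_mem tickets x i).mp this).2.2
    · have : ids[q.2.toNat]'(by omega) ∈ ids := List.getElem_mem _
      rw [hinj.2] at this
      exact ((pv_occ_mem tickets x j).mp this).2.2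
  · rintro ⟨hxi, hxj⟩
    have hi : i ∈ ids := (pv_occ_mem tickets x i).mpr ⟨h0, by omega, hxi⟩
    have hj : j ∈ ids := (pv_occ_mem tickets x j).mpr ⟨by omega, hjn, hxj⟩
    obtain ⟨a, ha, hea⟩ := List.mem_iff_getElem.mp hi
    obtain ⟨b, hb, heb⟩ := List.mem_iff_getElem.mp hj
    have hab : a < b := by
      rcases Nat.lt_trichotomy a b with h | h | h
      · exact h
      · exfalso; subst h; rw [hea] at heb; omega
      · exfalso
        have := hpw b a hb ha h
        rw [hea, heb] at this
        omega
    refine ⟨((a : Int), (b : Int)), ?_, ?_⟩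
    · rw [pv_mem_pvPairs]
      simp only [PySem.List.len]
      refine ⟨by omega, by omega, by omega⟩
    · rw [pv_pyGet_getD ids 0 (a := (a : Int)) (by omega) (by simp; omega),
          pv_pyGet_getD ids 0 (a := (b : Int)) (by omega) (by simp; omega)]
      simp only [Int.toNat_natCast]
      rw [show ids[a]'(by omega) = i from hea, show ids[b]'(by omega) = j from heb]

theorem pv_count_bump (tickets : List (List Int)) (x : Int) {i j : Int}
    (h0 : 0 ≤ i) (hij : i < j) (hjn : j < (tickets.length : Int)) :
    (pvBump (pvOcc tickets x)).count (pvKey i j)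
      = if (x ∈ pvTk tickets i ∧ x ∈ pvTk tickets j) then 1 else 0 := by
  by_cases h : (x ∈ pvTk tickets i ∧ x ∈ pvTk tickets j)
  · rw [if_pos h]
    exact List.count_eq_one_of_mem (pv_nodup_bump tickets x)
      ((pv_mem_bump tickets x h0 hij hjn).mpr h)
  · rw [if_neg h]
    exact List.count_eq_zero_of_not_mem
      (fun hc => h ((pv_mem_bump tickets x h0 hij hjn).mp hc))

theorem pv_count_K (tickets : List (List Int)) {i j : Int}
    (hp : (i, j) ∈ pvPairs (tickets.length : Int)) :
    ((pvK tickets).count (pvKey i j) : Int) = pvOv tickets i j := by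
  obtain ⟨h0, hij, hjn⟩ := pv_mem_pvPairs.mp hp
  rw [pvK, pv_count_flatMap, pv_index_values, List.map_map]
  have hmap : ((pvIndex tickets).keys.map
        ((fun ids => (pvBump ids).count (pvKey i j)) ∘ pvOcc tickets))
      = (pvIndex tickets).keys.map
        (fun x => if (x ∈ pvTk tickets i ∧ x ∈ pvTk tickets j) then 1 else 0) :=
    List.map_congr_left (fun x _ => pv_count_bump tickets x h0 hij hjn)
  rw [hmap, pv_sum_ite_eq_countP, List.countP_eq_length_filter]
  rw [pvOv, PySem.Set.len, PySem.Set.inter]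
  have hlen : ((pvIndex tickets).keys.filter
        (fun x => decide (x ∈ pvTk tickets i ∧ x ∈ pvTk tickets j))).length
      = ((PySem.Set.ofList (pvTk tickets i)).filter
        (fun z => (PySem.Set.ofList (pvTk tickets j)).contains z)).length := by
    apply pv_length_eq_of_nodup_mem_iff
    · exact List.Nodup.filter _ (pv_nodup_index_keys tickets)
    · exact List.Nodup.filter _ (PySem.Set.nodup_ofList _)
    · intro z
      rw [List.mem_filter, List.mem_filter, PySem.Set.mem_ofList]
      simp only [decide_eq_true_eq]
      constructor
      · rintro ⟨_, hz⟩
        refine ⟨hz.1, ?_⟩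
        simp only [PySem.Set.contains, List.contains_iff_exists_mem_beq]
        exact ⟨z, (PySem.Set.mem_ofList _ _).mpr hz.2, by simp⟩
      · rintro ⟨hz1, hz2⟩
        simp only [PySem.Set.contains, List.contains_iff_exists_mem_beq] at hz2
        obtain ⟨z', hz', he⟩ := hz2
        have : z = z' := by simpa using he
        subst this
        refine ⟨?_, hz1, (PySem.Set.mem_ofList _ _).mp hz'⟩
        exact (pv_mem_index_keys tickets z).mpr ⟨i, h0, by omega, hz1⟩
  rw [hlen]

-- ## assembling both ports

theorem pv_A_eq (tickets : List (List Int)) (h : ¬ PySem.List.len tickets < 2) :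
    analyze_ticket_overlap_py tickets
    = (pvPairs (PySem.List.len tickets)).map (fun p => (pvKeyP p, pvOv tickets p.1 p.2)) := by
  simp only [analyze_ticket_overlap_py]
  rw [if_neg h]
  exact pv_fold_insert_items _ (fun i j => pvOv tickets i j)

theorem pv_B_eq (tickets : List (List Int)) (h : ¬ PySem.List.len tickets < 2) :
    analyze_ticket_overlap_py_alt tickets
    = ((pvK tickets).foldl (fun d k => d.modify k 0 (· + 1))
        (PySem.Dict.mk ((pvPairs (PySem.List.len tickets)).map (fun p => (pvKeyP p, (0 : Int)))))).items := by
  simp only [analyze_ticket_overlap_py_alt]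
  rw [if_neg h]
  have hov : ((PySem.List.pyRange 0 (PySem.List.len tickets)).foldl (fun d i =>
        (PySem.List.pyRange (i + 1) (PySem.List.len tickets)).foldl
          (fun d j => d.insert (pvKey i j) (0 : Int)) d) PySem.Dict.empty)
      = PySem.Dict.mk ((pvPairs (PySem.List.len tickets)).map (fun p => (pvKeyP p, (0 : Int)))) :=
    PySem.Dict.ext (pv_fold_insert_items _ (fun _ _ => (0 : Int)))
  rw [hov]
  have hfin : ∀ (d0 : PySem.Dict String Int),
      (pvIndex tickets).values.foldl (fun d ids =>
        (PySem.List.pyRange 0 (PySem.List.len ids)).foldl (fun d a =>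
          (PySem.List.pyRange (a + 1) (PySem.List.len ids)).foldl (fun d b =>
            d.modify (pvKey ((PySem.List.pyGet? ids a).getD 0) ((PySem.List.pyGet? ids b).getD 0))
              0 (· + 1)) d) d) d0
      = (pvK tickets).foldl (fun d k => d.modify k 0 (· + 1)) d0 := by
    intro d0
    have hfun : (fun (d : PySem.Dict String Int) (ids : List Int) =>
        (PySem.List.pyRange 0 (PySem.List.len ids)).foldl (fun d a =>
          (PySem.List.pyRange (a + 1) (PySem.List.len ids)).foldl (fun d b =>
            d.modify (pvKey ((PySem.List.pyGet? ids a).getD 0) ((PySem.List.pyGet? ids b).getD 0))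
              0 (· + 1)) d) d)
        = (fun (d : PySem.Dict String Int) (ids : List Int) =>
        (pvBump ids).foldl (fun d k => d.modify k 0 (· + 1)) d) := by
      funext d ids
      rw [pv_fold_pairs (PySem.List.len ids)
        (fun d a b => d.modify (pvKey ((PySem.List.pyGet? ids a).getD 0)
          ((PySem.List.pyGet? ids b).getD 0)) 0 (· + 1)) d]
      rw [pvBump, List.foldl_map]
    rw [hfun, pv_foldl_nested, pvK]
  exact congrArg PySem.Dict.items (hfin _)

theorem pv_final_items (tickets : List (List Int)) :
    ((pvK tickets).foldl (fun d k => d.modify k 0 (· + 1))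
        (PySem.Dict.mk ((pvPairs (PySem.List.len tickets)).map (fun p => (pvKeyP p, (0 : Int)))))).items
    = (pvPairs (PySem.List.len tickets)).map (fun p => (pvKeyP p, pvOv tickets p.1 p.2)) := by
  set D0 := PySem.Dict.mk ((pvPairs (PySem.List.len tickets)).map (fun p => (pvKeyP p, (0 : Int)))) with hD0
  have hkeys0 : D0.keys = (pvPairs (PySem.List.len tickets)).map pvKeyP := by
    rw [hD0, PySem.Dict.keys_mk, List.map_map]
    rfl
  have hnodup0 : D0.keys.Nodup := by rw [hkeys0]; exact pv_nodup_keymap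
  have hkeys : ((pvK tickets).foldl (fun d k => d.modify k 0 (· + 1)) D0).keys = D0.keys := by
    calc ((pvK tickets).foldl (fun d k => d.modify k 0 (· + 1)) D0).keys
        = PySem.Set.update D0.keys (pvK tickets) :=
          PySem.Dict.keys_foldl_modify (pvK tickets) 0 (fun _ _ => (· + 1)) D0
      _ = D0.keys := by
          apply pv_set_update_self
          intro k hk
          rw [hkeys0]
          exact pv_K_sub tickets k hk
  have hnodupf : ((pvK tickets).foldl (fun d k => d.modify k 0 (· + 1)) D0).keys.Nodup := by
    rw [hkeys]; exact hnodup0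
  rw [PySem.Dict.items_eq_map_keys _ hnodupf (0 : Int), hkeys, hkeys0, List.map_map]
  apply List.map_congr_left
  intro p hp
  have hgd : ((pvK tickets).foldl (fun d k => d.modify k 0 (· + 1)) D0).getD (pvKeyP p) 0
      = D0.getD (pvKeyP p) 0 + ((pvK tickets).count (pvKeyP p) : Int) :=
    PySem.Dict.getD_foldl_modify_add_one _ _ _
  have hz : D0.getD (pvKeyP p) 0 = 0 := by
    have hm : (pvKeyP p, (0 : Int)) ∈ D0.items := List.mem_map.mpr ⟨p, hp, rfl⟩
    exact PySem.Dict.getD_of_mem_items D0 hm hnodup0 0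
  have hcount : ((pvK tickets).count (pvKeyP p) : Int) = pvOv tickets p.1 p.2 := by
    have hp' : (p.1, p.2) ∈ pvPairs ((tickets.length : Int)) := hp
    exact pv_count_K tickets hp'
  simp only [Function.comp_apply]
  rw [hgd, hz, zero_add, hcount]

-- ===== VERDICT (by name: the statement is the Claim_ definition above) =====
theorem analyze_ticket_overlap_py_spec : Claim_equal_analyze_ticket_overlap_py := by
  intro tickets _
  unfold Spec_analyze_ticket_overlap_py
  by_cases h : PySem.List.len tickets < 2
  · simp only [analyze_ticket_overlap_py, analyze_ticket_overlap_py_alt]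
    rw [if_pos h, if_pos h]
  · rw [pv_A_eq tickets h, pv_B_eq tickets h, pv_final_items tickets]
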